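-- pv_equiv track=rewrite | github.com/DystopiaScript/Simulacion | Metodos/generation.py | Generacion
-- ===== SOURCE A (Python) =====
-- def Generacion(randomNumber, n):
--     size=len(str(randomNumber))
--     xi = randomNumber
--     ri = []
--     for _ in range(n):
--         xi = xi ** 2
--         c=center(size, xi)
--         xi = int(c)
--         ri.append(c)
--     return ri
--
-- def center(size, number):
--     number_str = str(number).zfill(size * 2)  # Asegura que tenga el doble de dígitos
--     start = (len(number_str) // 2 - size // 2)  # Índice de inicio
--     end = start + size  # Índice de fin
--     return number_str[start:end]  # Retorna los dígitos centrales
-- ===== SOURCE B (Python) =====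
-- def Generacion(randomNumber, n):
--     # Middle-square PRNG: extract the center digits arithmetically (div/mod by
--     # powers of 10) instead of via string slicing; format once per step.
--     size = len(str(randomNumber))
--     drop = 10 ** (size // 2)      # low digits discarded by the center window
--     keep = 10 ** size             # width of the center window
--     xi = randomNumber
--     ri = []
--     for _ in range(n):
--         xi = xi * xi // drop % keep
--         ri.append(str(xi).zfill(size))
--     return ri
-- ===== Notes on version B (the rewrite author's own statement) =====
-- stated objective: alternative
-- what changed: Each middle-square step now extracts the center digits with pure integer arithmetic (xi*xi // 10**(size//2) % 10**size) and formats the result once with zfill, instead of zero-padding the square to a string and slicing out the middle then parsing it back with int().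
import Mathlib
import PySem

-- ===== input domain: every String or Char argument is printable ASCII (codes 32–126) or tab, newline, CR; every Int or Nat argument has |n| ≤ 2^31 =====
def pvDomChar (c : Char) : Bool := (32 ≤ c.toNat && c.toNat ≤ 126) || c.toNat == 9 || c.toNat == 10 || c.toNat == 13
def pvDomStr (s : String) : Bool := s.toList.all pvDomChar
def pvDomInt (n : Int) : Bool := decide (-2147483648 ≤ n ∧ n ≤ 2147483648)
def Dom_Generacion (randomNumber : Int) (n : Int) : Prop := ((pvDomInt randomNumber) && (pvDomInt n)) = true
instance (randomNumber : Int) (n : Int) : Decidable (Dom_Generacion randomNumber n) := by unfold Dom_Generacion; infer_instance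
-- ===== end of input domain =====

-- B replaces the per-step string-slice-and-reparse (zfill, middle slice, int()) of the
-- middle-square PRNG by pure integer arithmetic (// and % by powers of 10), formatting once.

-- ===== PORT A =====
-- helper `center` of A
def pyCenter (size : Int) (number : Int) : String :=
  let numberStr := PySem.Str.zfill (PySem.Int.toStr number) (size * 2)
  let start := PySem.Int.floordiv (PySem.Str.len numberStr) 2 - PySem.Int.floordiv size 2
  PySem.Str.slice numberStr (some start) (some (start + size))

-- int(c) for the strings A feeds it: `center` always returns a nonempty run of ASCII digits
-- (proved below: it is `padC s q`), and on such strings Python's int(c) is exactly the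
-- base-10 value of the digit run; this fold computes that value digit by digit.
def pyIntDigits (c : String) : Int :=
  ((c.toList.foldl (fun a ch => 10 * a + (ch.toNat - 48)) 0 : Nat) : Int)

def GenLoopA (size : Int) : Nat → Int → List String → List String
  | 0, _, ri => ri
  | k+1, xi, ri =>
    let xi2 := xi ^ 2
    let c := pyCenter size xi2
    let xi' := pyIntDigits c
    GenLoopA size k xi' (ri ++ [c])

def Generacion (randomNumber : Int) (n : Int) : List String :=
  let size := PySem.Str.len (PySem.Int.toStr randomNumber)
  GenLoopA size n.toNat randomNumber []

-- ===== PORT B =====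
def GenLoopB (size dropP keepP : Int) : Nat → Int → List String → List String
  | 0, _, ri => ri
  | k+1, xi, ri =>
    let xi' := PySem.Int.mod (PySem.Int.floordiv (xi * xi) dropP) keepP
    GenLoopB size dropP keepP k xi' (ri ++ [PySem.Str.zfill (PySem.Int.toStr xi') size])

def Generacion_alt (randomNumber : Int) (n : Int) : List String :=
  let size := PySem.Str.len (PySem.Int.toStr randomNumber)
  -- 10 ** e: the exponents size // 2 and size are ≥ 0 (size ≥ 1 always), so Int-power with
  -- the Nat exponent `.toNat` is exact here
  let dropP := (10 : Int) ^ (PySem.Int.floordiv size 2).toNat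
  let keepP := (10 : Int) ^ size.toNat
  GenLoopB size dropP keepP n.toNat randomNumber []

-- ===== PRECONDITION & SPEC =====
def Spec_Generacion (randomNumber : Int) (n : Int) (out : List String) : Prop := out = Generacion_alt randomNumber n
instance (randomNumber : Int) (n : Int) (out : List String) : Decidable (Spec_Generacion randomNumber n out) := by unfold Spec_Generacion; infer_instance

-- ===== CLAIM (what is proved, stated in full; the proofs are below) =====
def Claim_equal_Generacion : Prop := ∀ (randomNumber : Int) (n : Int), Dom_Generacion randomNumber n → Spec_Generacion randomNumber n (Generacion randomNumber n)

-- ===== LEMMAS AND PROOFS =====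

/-- `padC w m`: the last `w` decimal digits of `m`, zero-padded to width `w`. -/
def padC : Nat → Nat → List Char
  | 0, _ => []
  | w+1, m => padC w (m / 10) ++ [Nat.digitChar (m % 10)]

theorem padC_length : ∀ (w m : Nat), (padC w m).length = w := by
  intro w
  induction w with
  | zero => intro m; rfl
  | succ w ih => intro m; simp [padC, ih]

theorem padC_not_sign : ∀ (w m : Nat), ∀ c ∈ padC w m, c ≠ '+' ∧ c ≠ '-' := by
  intro w
  induction w with
  | zero => intro m c hc; simp [padC] at hc
  | succ w ih =>
    intro m c hc
    simp only [padC, List.mem_append, List.mem_singleton] at hc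
    rcases hc with h | h
    · exact ih _ c h
    · subst h
      have hd : m % 10 < 10 := Nat.mod_lt _ (by norm_num)
      have : ∀ d, d < 10 → Nat.digitChar d ≠ '+' ∧ Nat.digitChar d ≠ '-' := by decide
      exact this _ hd

theorem toDigitsCore_eq : ∀ (f m : Nat) (acc : List Char), m < f →
    Nat.toDigitsCore 10 f m acc = padC (Nat.log 10 m + 1) m ++ acc := by
  intro f
  induction f with
  | zero => intro m acc h; omega
  | succ f ih =>
    intro m acc hm
    by_cases h : m / 10 = 0
    · have hm10 : m < 10 := by omega
      have hlog : Nat.log 10 m = 0 := Nat.log_eq_zero_iff.mpr (Or.inl hm10)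
      simp [Nat.toDigitsCore, h, hlog, padC]
    · have h10 : 10 ≤ m := by
        by_contra hcon
        exact h (Nat.div_eq_of_lt (by omega))
      have hlt : m / 10 < f := by
        have h1 : m / 10 < m := Nat.div_lt_self (by omega) (by norm_num)
        omega
      have hlog : Nat.log 10 m = Nat.log 10 (m / 10) + 1 := by
        have h1 := Nat.log_div_base 10 m
        have h2 : Nat.log 10 m ≠ 0 := by
          rw [Ne, Nat.log_eq_zero_iff]
          rintro (h1 | h2)
          · omega
          · norm_num at h2
        omega
      simp only [Nat.toDigitsCore, h, if_false]
      rw [ih (m / 10) _ hlt, hlog]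
      simp [padC]

theorem toDigits_eq (m : Nat) : Nat.toDigits 10 m = padC (Nat.log 10 m + 1) m := by
  rw [Nat.toDigits, toDigitsCore_eq (m + 1) m [] (Nat.lt_succ_self m), List.append_nil]

theorem toChars_of_nonneg (m : Nat) :
    PySem.Int.toChars (m : Int) = padC (Nat.log 10 m + 1) m := by
  simp [PySem.Int.toChars, toDigits_eq]

theorem padC_cons_zero : ∀ (w m : Nat), m < 10 ^ w → padC (w + 1) m = '0' :: padC w m := by
  intro w
  induction w with
  | zero =>
    intro m h
    simp only [pow_zero] at h
    have : m = 0 := by omega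
    subst this
    decide
  | succ w ih =>
    intro m h
    have h' : m / 10 < 10 ^ w := by
      apply Nat.div_lt_of_lt_mul
      calc m < 10 ^ (w + 1) := h
      _ = 10 * 10 ^ w := by ring
    calc padC (w + 2) m = padC (w + 1) (m / 10) ++ [Nat.digitChar (m % 10)] := by simp [padC]
    _ = ('0' :: padC w (m / 10)) ++ [Nat.digitChar (m % 10)] := by rw [ih _ h']
    _ = '0' :: padC (w + 1) m := by simp [padC]

theorem padC_replicate : ∀ (k w m : Nat), m < 10 ^ w →
    padC (w + k) m = List.replicate k '0' ++ padC w m := by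
  intro k
  induction k with
  | zero => intro w m _; simp
  | succ k ih =>
    intro w m h
    have hk : m < 10 ^ (w + k) := lt_of_lt_of_le h (Nat.pow_le_pow_right (by norm_num) (by omega))
    calc padC (w + (k + 1)) m = padC ((w + k) + 1) m := rfl
    _ = '0' :: padC (w + k) m := padC_cons_zero _ _ hk
    _ = '0' :: (List.replicate k '0' ++ padC w m) := by rw [ih _ _ h]
    _ = List.replicate (k + 1) '0' ++ padC w m := by simp [List.replicate_succ]

theorem padC_mod : ∀ (w m : Nat), padC w m = padC w (m % 10 ^ w) := by
  intro w
  induction w with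
  | zero => intro m; rfl
  | succ w ih =>
    intro m
    have hmod : m % 10 ^ (w + 1) % 10 = m % 10 := by
      apply Nat.mod_mod_of_dvd
      exact dvd_pow_self 10 (Nat.succ_ne_zero w)
    have hdiv : m % 10 ^ (w + 1) / 10 = m / 10 % 10 ^ w := by
      have : (10 : Nat) ^ (w + 1) = 10 * 10 ^ w := by ring
      rw [this, Nat.mod_mul_right_div_self]
    calc padC (w + 1) m = padC w (m / 10) ++ [Nat.digitChar (m % 10)] := by simp [padC]
    _ = padC w (m / 10 % 10 ^ w) ++ [Nat.digitChar (m % 10)] := by rw [ih (m / 10)]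
    _ = padC (w + 1) (m % 10 ^ (w + 1)) := by simp [padC, hmod, hdiv]

theorem padC_split : ∀ (w2 w1 m : Nat),
    padC (w1 + w2) m = padC w1 (m / 10 ^ w2) ++ padC w2 m := by
  intro w2
  induction w2 with
  | zero => intro w1 m; simp [padC]
  | succ w2 ih =>
    intro w1 m
    calc padC (w1 + (w2 + 1)) m
        = padC (w1 + w2) (m / 10) ++ [Nat.digitChar (m % 10)] := by simp [padC]
    _ = (padC w1 (m / 10 / 10 ^ w2) ++ padC w2 (m / 10)) ++ [Nat.digitChar (m % 10)] := by
          rw [ih]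
    _ = padC w1 (m / 10 ^ (w2 + 1)) ++ (padC w2 (m / 10) ++ [Nat.digitChar (m % 10)]) := by
          rw [Nat.div_div_eq_div_mul, List.append_assoc]
          congr 2
          ring
    _ = padC w1 (m / 10 ^ (w2 + 1)) ++ padC (w2 + 1) m := by simp [padC]

theorem foldl_padC : ∀ (w m a : Nat),
    (padC w m).foldl (fun a ch => 10 * a + (ch.toNat - 48)) a = a * 10 ^ w + m % 10 ^ w := by
  intro w
  induction w with
  | zero => intro m a; simp [padC, Nat.mod_one]
  | succ w ih =>
    intro m a
    have hd : (Nat.digitChar (m % 10)).toNat - 48 = m % 10 := by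
      have h10 : m % 10 < 10 := Nat.mod_lt _ (by norm_num)
      have : ∀ d, d < 10 → (Nat.digitChar d).toNat - 48 = d := by decide
      exact this _ h10
    have hM : m % 10 ^ (w + 1) = 10 * (m / 10 % 10 ^ w) + m % 10 := by
      have h1 : m % 10 ^ (w + 1) % 10 = m % 10 :=
        Nat.mod_mod_of_dvd _ (dvd_pow_self 10 (Nat.succ_ne_zero w))
      have h2 : m % 10 ^ (w + 1) / 10 = m / 10 % 10 ^ w := by
        have h : (10 : Nat) ^ (w + 1) = 10 * 10 ^ w := by ring
        rw [h, Nat.mod_mul_right_div_self]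
      omega
    calc (padC (w + 1) m).foldl (fun a ch => 10 * a + (ch.toNat - 48)) a
        = (padC w (m / 10) ++ [Nat.digitChar (m % 10)]).foldl
            (fun a ch => 10 * a + (ch.toNat - 48)) a := by simp [padC]
    _ = 10 * (a * 10 ^ w + m / 10 % 10 ^ w) + ((Nat.digitChar (m % 10)).toNat - 48) := by
          rw [List.foldl_append, ih]; rfl
    _ = a * 10 ^ (w + 1) + m % 10 ^ (w + 1) := by rw [hd, hM]; ring

theorem zfill_cons_digit (c : Char) (rest : List Char) (w : Nat)
    (h1 : ¬ (c = '+' ∨ c = '-')) (h2 : (c :: rest).length < w) :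
    PySem.Chars.zfill (c :: rest) (w : Int)
      = List.replicate (w - (c :: rest).length) '0' ++ (c :: rest) := by
  rw [PySem.Chars.zfill.eq_def]
  rw [if_neg (by simp only [List.length_cons] at h2 ⊢; omega)]
  show (if c = '+' ∨ c = '-'
      then c :: (List.replicate ((w : Int).toNat - (c :: rest).length) '0' ++ rest)
      else List.replicate ((w : Int).toNat - (c :: rest).length) '0' ++ (c :: rest)) = _
  rw [if_neg h1, Int.toNat_natCast]

theorem zfill_padC (m w L : Nat) (hm : m < 10 ^ L) (hL : 1 ≤ L) (hLw : L ≤ w) :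
    PySem.Chars.zfill (padC L m) (w : Int) = padC w m := by
  by_cases hwL : w = L
  · subst hwL
    rw [PySem.Chars.zfill.eq_def]
    rw [if_pos (by rw [padC_length])]
  · obtain ⟨c, rest, hcr⟩ : ∃ c rest, padC L m = c :: rest := by
      cases h : padC L m with
      | nil => exfalso; have := padC_length L m; rw [h] at this; simp at this; omega
      | cons c rest => exact ⟨c, rest, rfl⟩
    have hsign := padC_not_sign L m c (by rw [hcr]; exact List.mem_cons_self)
    have hlenc : (c :: rest).length = L := by rw [← hcr]; exact padC_length L m
    rw [hcr, zfill_cons_digit c rest w (by tauto) (by omega), hlenc, ← hcr]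
    have hw : w = L + (w - L) := by omega
    rw [hw, padC_replicate (w - L) L m hm]
    congr 2
    omega

theorem log_succ_le (m k : Nat) (h : m < 10 ^ k) (hk : 1 ≤ k) : Nat.log 10 m + 1 ≤ k := by
  by_cases hm : m = 0
  · subst hm; rw [Nat.log_zero_right]; omega
  · have := Nat.log_lt_of_lt_pow hm h
    omega

theorem padC_middle (s m : Nat) :
    List.take s (List.drop (s - s / 2) (padC (2 * s) m)) = padC s (m / 10 ^ (s / 2)) := by
  have h2 : 2 * s = (s - s / 2) + (s + s / 2) := by omega
  rw [h2, padC_split (s + s / 2) (s - s / 2) m, padC_split (s / 2) s m]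
  rw [List.drop_left' (padC_length _ _), List.take_left' (padC_length _ _)]

theorem center_eq (s : Nat) (hs : 1 ≤ s) (y : Int) (hy : 0 ≤ y) (hlt : y.toNat < 10 ^ (2 * s)) :
    pyCenter (s : Int) y = String.ofList (padC s (y.toNat / 10 ^ (s / 2))) := by
  obtain ⟨m, rfl⟩ : ∃ m : Nat, y = (m : Int) := ⟨y.toNat, (Int.toNat_of_nonneg hy).symm⟩
  rw [Int.toNat_natCast] at hlt ⊢
  have hL : Nat.log 10 m + 1 ≤ 2 * s := log_succ_le m (2 * s) hlt (by omega)
  have hcast : ((s : Int) * 2) = ((2 * s : Nat) : Int) := by push_cast; ring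
  have hlist : (PySem.Str.zfill (PySem.Int.toStr (m : Int)) ((s : Int) * 2)).toList
      = padC (2 * s) m := by
    rw [PySem.Str.toList_zfill, PySem.Int.toList_toStr, toChars_of_nonneg, hcast]
    exact zfill_padC m (2 * s) _ (Nat.lt_pow_succ_log_self (by norm_num) m) (by omega) hL
  have hlen : PySem.Str.len (PySem.Str.zfill (PySem.Int.toStr (m : Int)) ((s : Int) * 2))
      = ((2 * s : Nat) : Int) := by
    rw [PySem.Str.len, hlist, padC_length]
  show PySem.Str.slice (PySem.Str.zfill (PySem.Int.toStr (m : Int)) ((s : Int) * 2))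
      (some (PySem.Int.floordiv
        (PySem.Str.len (PySem.Str.zfill (PySem.Int.toStr (m : Int)) ((s : Int) * 2))) 2
        - PySem.Int.floordiv (s : Int) 2))
      (some ((PySem.Int.floordiv
        (PySem.Str.len (PySem.Str.zfill (PySem.Int.toStr (m : Int)) ((s : Int) * 2))) 2
        - PySem.Int.floordiv (s : Int) 2) + (s : Int))) = _
  rw [hlen]
  have hfd1 : PySem.Int.floordiv ((2 * s : Nat) : Int) 2 = ((s : Nat) : Int) := by
    rw [show ((2 : Int)) = ((2 : Nat) : Int) from rfl, PySem.Int.floordiv_natCast]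
    congr 1
    omega
  have hfd2 : PySem.Int.floordiv ((s : Nat) : Int) 2 = ((s / 2 : Nat) : Int) := by
    rw [show ((2 : Int)) = ((2 : Nat) : Int) from rfl, PySem.Int.floordiv_natCast]
  rw [hfd1, hfd2]
  have hsub : ((s : Int)) - ((s / 2 : Nat) : Int) = ((s - s / 2 : Nat) : Int) := by
    rw [Int.natCast_sub (Nat.div_le_self s 2)]
  rw [hsub]
  rw [PySem.Str.slice]
  congr 1
  rw [hlist, PySem.Chars.slice_eq_listSlice]
  rw [show ((s - s / 2 : Nat) : Int) + (s : Int)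
      = ((s - s / 2 : Nat) : Int) + ((s : Nat) : Int) from rfl]
  rw [PySem.List.slice_natCast_add]
  exact padC_middle s m

theorem loop_eq (s : Nat) (hs : 1 ≤ s) :
    ∀ (k : Nat) (x : Int) (ri : List String), x.natAbs < 10 ^ s →
    GenLoopA (s : Int) k x ri
      = GenLoopB (s : Int) ((10 : Int) ^ (s / 2)) ((10 : Int) ^ s) k x ri := by
  intro k
  induction k with
  | zero => intro x ri _; rfl
  | succ k ih =>
    intro x ri hx
    have hmlt : x.natAbs * x.natAbs < 10 ^ (2 * s) := by
      calc x.natAbs * x.natAbs < 10 ^ s * 10 ^ s := Nat.mul_lt_mul'' hx hx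
      _ = 10 ^ (2 * s) := by rw [two_mul, pow_add]
    have hxsq : (x ^ 2).toNat = x.natAbs * x.natAbs := by
      rw [sq, ← Int.natAbs_mul_self, Int.toNat_natCast]
    have hq : x.natAbs * x.natAbs / 10 ^ (s / 2) % 10 ^ s < 10 ^ s :=
      Nat.mod_lt _ (Nat.pow_pos (by norm_num))
    set q : Nat := x.natAbs * x.natAbs / 10 ^ (s / 2) % 10 ^ s with hqdef
    have hc : pyCenter (s : Int) (x ^ 2) = String.ofList (padC s q) := by
      rw [center_eq s hs (x ^ 2) (sq_nonneg x) (by rw [hxsq]; exact hmlt), hxsq]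
      rw [padC_mod s (x.natAbs * x.natAbs / 10 ^ (s / 2))]
    have hB : PySem.Int.mod (PySem.Int.floordiv (x * x) ((10 : Int) ^ (s / 2))) ((10 : Int) ^ s)
        = (q : Int) := by
      rw [← Int.natAbs_mul_self]
      rw [show ((10 : Int) ^ (s / 2)) = ((10 ^ (s / 2) : Nat) : Int) by push_cast; ring]
      rw [show ((10 : Int) ^ s) = ((10 ^ s : Nat) : Int) by push_cast; ring]
      rw [PySem.Int.floordiv_natCast, PySem.Int.mod_natCast]
    have hA : pyIntDigits (pyCenter (s : Int) (x ^ 2)) = (q : Int) := by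
      rw [hc]
      unfold pyIntDigits
      rw [String.toList_ofList, foldl_padC]
      simp [Nat.mod_eq_of_lt hq]
    have hBs : PySem.Str.zfill (PySem.Int.toStr ((q : Nat) : Int)) (s : Int)
        = String.ofList (padC s q) := by
      rw [PySem.Str.zfill]
      congr 1
      rw [PySem.Int.toList_toStr, toChars_of_nonneg]
      exact zfill_padC q s _ (Nat.lt_pow_succ_log_self (by norm_num) q)
        (by omega) (log_succ_le q s hq hs)
    show GenLoopA (s : Int) k (pyIntDigits (pyCenter (s : Int) (x ^ 2)))
        (ri ++ [pyCenter (s : Int) (x ^ 2)]) = _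
    rw [hA, hc]
    show _ = GenLoopB (s : Int) ((10 : Int) ^ (s / 2)) ((10 : Int) ^ s) k
        (PySem.Int.mod (PySem.Int.floordiv (x * x) ((10 : Int) ^ (s / 2))) ((10 : Int) ^ s))
        (ri ++ [PySem.Str.zfill (PySem.Int.toStr
          (PySem.Int.mod (PySem.Int.floordiv (x * x) ((10 : Int) ^ (s / 2))) ((10 : Int) ^ s)))
          (s : Int)])
    rw [hB, hBs]
    exact ih (q : Int) _ (by rw [Int.natAbs_natCast]; exact hq)

theorem size_facts (rn : Int) :
    1 ≤ (PySem.Int.toChars rn).length ∧ rn.natAbs < 10 ^ (PySem.Int.toChars rn).length := by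
  by_cases hrn : rn < 0
  · have hch : PySem.Int.toChars rn = '-' :: Nat.toDigits 10 rn.natAbs := by
      simp [PySem.Int.toChars, hrn]
    rw [hch, toDigits_eq, List.length_cons, padC_length]
    constructor
    · omega
    · calc rn.natAbs < 10 ^ (Nat.log 10 rn.natAbs + 1) :=
        Nat.lt_pow_succ_log_self (by norm_num) _
      _ ≤ 10 ^ (Nat.log 10 rn.natAbs + 1 + 1) :=
        Nat.pow_le_pow_right (by norm_num) (by omega)
  · have hrn' : 0 ≤ rn := by omega
    obtain ⟨m, rfl⟩ : ∃ m : Nat, rn = (m : Int) := ⟨rn.toNat, (Int.toNat_of_nonneg hrn').symm⟩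
    rw [toChars_of_nonneg, padC_length, Int.natAbs_natCast]
    exact ⟨by omega, Nat.lt_pow_succ_log_self (by norm_num) m⟩

-- ===== VERDICT (by name: the statement is the Claim_ definition above) =====
theorem Generacion_spec : Claim_equal_Generacion := by
  intro rn n _hdom
  show Generacion rn n = Generacion_alt rn n
  obtain ⟨hs, habs⟩ := size_facts rn
  set sN : Nat := (PySem.Int.toChars rn).length with hsN
  have hsI : PySem.Str.len (PySem.Int.toStr rn) = ((sN : Nat) : Int) := by
    rw [PySem.Str.len, PySem.Int.toList_toStr]
  show GenLoopA (PySem.Str.len (PySem.Int.toStr rn)) n.toNat rn []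
      = GenLoopB (PySem.Str.len (PySem.Int.toStr rn))
          ((10 : Int) ^ (PySem.Int.floordiv (PySem.Str.len (PySem.Int.toStr rn)) 2).toNat)
          ((10 : Int) ^ (PySem.Str.len (PySem.Int.toStr rn)).toNat) n.toNat rn []
  rw [hsI]
  have hfd : (PySem.Int.floordiv ((sN : Nat) : Int) 2).toNat = sN / 2 := by
    rw [show ((2 : Int)) = ((2 : Nat) : Int) from rfl, PySem.Int.floordiv_natCast,
      Int.toNat_natCast]
  have htn : (((sN : Nat) : Int)).toNat = sN := Int.toNat_natCast sN
  rw [hfd, htn]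
  exact loop_eq sN hs n.toNat rn [] habs
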